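-- pv_equiv track=rewrite | github.com/pablomartinez/dailyprogrammer | 319/easy/condensing.py | condense_words
-- ===== SOURCE A (Python) =====
-- def condense_words(w1, w2):
--     common = 0
--     length = min(len(w1), len(w2))
--     for x in range(1, length):
--         if w1.endswith(w2[:x]):
--             common = x
--     if length == 0 or common > 0:
--         return "{0}{1}".format(w1, w2[common:])
--     else:
--         return "{0} {1}".format(w1, w2)
-- ===== SOURCE B (Python) =====
-- def condense_words(w1, w2):
--     # KMP prefix function on w2 + sentinel + w1: the final state is the longest
--     # overlap (longest prefix of w2 that is a suffix of w1); one failure-link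
--     # step drops a full-length overlap, which the task treats as no merge point
--     # beyond min(len)-1.
--     length = min(len(w1), len(w2))
--     s = w2 + "\x00" + w1
--     pi = [0]
--     k = 0
--     for i in range(1, len(s)):
--         while k > 0 and s[i] != s[k]:
--             k = pi[k - 1]
--         if s[i] == s[k]:
--             k += 1
--         pi.append(k)
--     common = k
--     if length > 0 and common == length:
--         common = pi[common - 1]
--     if length == 0 or common > 0:
--         return w1 + w2[common:]
--     return w1 + " " + w2
-- ===== Notes on version B (the rewrite author's own statement) =====
-- stated objective: faster
-- what changed: Replaces A's scan that re-tests every prefix length of w2 with endswith (quadratic work) by a single KMP prefix-function pass over w2 + '\x00' + w1, reading the longest overlap off the final failure value (with one failure-link step when the overlap is full length).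
import Mathlib
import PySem

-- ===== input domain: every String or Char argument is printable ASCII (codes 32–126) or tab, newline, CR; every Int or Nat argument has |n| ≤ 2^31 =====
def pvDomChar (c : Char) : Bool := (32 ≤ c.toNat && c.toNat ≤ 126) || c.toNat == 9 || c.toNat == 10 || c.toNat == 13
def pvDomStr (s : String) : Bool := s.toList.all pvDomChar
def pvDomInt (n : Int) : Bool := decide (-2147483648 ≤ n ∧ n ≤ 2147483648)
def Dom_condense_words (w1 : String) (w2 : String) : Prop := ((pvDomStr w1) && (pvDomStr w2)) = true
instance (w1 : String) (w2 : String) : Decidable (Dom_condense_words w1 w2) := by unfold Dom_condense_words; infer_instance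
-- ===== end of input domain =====

-- B replaces A's quadratic scan over all prefix lengths by a single KMP prefix-function
-- pass over w2 + '\x00' + w1 (the sentinel lies outside the printable-ASCII domain).

-- ===== PORT A =====
def condense_words (w1 : String) (w2 : String) : String :=
  let length : Int := min (PySem.Str.len w1) (PySem.Str.len w2)
  let common : Int :=
    (PySem.List.pyRange 1 length 1).foldl
      (fun common x =>
        if PySem.Str.endswith w1 (PySem.Str.slice w2 none (some x)) then x else common) 0
  if length = 0 ∨ common > 0 then
    -- "{0}{1}".format(w1, w2[common:]) is string concatenation
    String.ofList (w1.toList ++ (PySem.Str.slice w2 (some common) none).toList)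
  else
    -- "{0} {1}".format(w1, w2)
    String.ofList (w1.toList ++ ' ' :: w2.toList)

-- ===== PORT B =====
-- while k > 0 and s[i] != s[k]: k = pi[k - 1]
-- (fuel = the starting k; exact, since every stored pi entry for a prefix of
--  length j is < j, so k strictly decreases and at most k steps happen)
def kmpDescend (s : List Char) (pi : List Nat) (c : Char) : Nat → Nat → Nat
  | 0, k => k
  | fuel + 1, k =>
      if 0 < k ∧ c ≠ s.getD k ' ' then kmpDescend s pi c fuel (pi.getD (k - 1) 0) else k

-- one iteration of Source B's for-loop body at index i (indices are in range, so getD is exact)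
def kmpStep (s : List Char) (st : List Nat × Nat) (i : Nat) : List Nat × Nat :=
  let c := s.getD i ' '
  let k := kmpDescend s st.1 c st.2 st.2
  let k := if c = s.getD k ' ' then k + 1 else k
  (st.1 ++ [k], k)

-- pi = [0]; k = 0; for i in range(1, len(s)): …  — returns (pi, k)
def kmpPrefix (s : List Char) : List Nat × Nat :=
  (List.range (s.length - 1)).foldl (fun st j => kmpStep s st (j + 1)) ([0], 0)

def condense_words_alt (w1 : String) (w2 : String) : String :=
  let l1 := w1.toList
  let l2 := w2.toList
  let length := min l1.length l2.length
  let s := l2 ++ Char.ofNat 0 :: l1          -- s = w2 + "\x00" + w1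
  let r := kmpPrefix s
  let common := r.2
  let common := if 0 < length ∧ common = length then r.1.getD (common - 1) 0 else common
  if length = 0 ∨ 0 < common then
    String.ofList (l1 ++ l2.drop common)      -- w1 + w2[common:]  (common ≥ 0, so slice = drop)
  else
    String.ofList (l1 ++ ' ' :: l2)           -- w1 + " " + w2

-- ===== PRECONDITION & SPEC =====
def Spec_condense_words (w1 : String) (w2 : String) (out : String) : Prop := out = condense_words_alt w1 w2
instance (w1 : String) (w2 : String) (out : String) : Decidable (Spec_condense_words w1 w2 out) := by unfold Spec_condense_words; infer_instance

-- ===== CLAIM (what is proved, stated in full; the proofs are below) =====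
def Claim_equal_condense_words : Prop := ∀ (w1 : String) (w2 : String), Dom_condense_words w1 w2 → Spec_condense_words w1 w2 (condense_words w1 w2)

-- ===== LEMMAS AND PROOFS =====

-- b is a (proper) border of t: a prefix of length b that is also a suffix, b < |t|
def isBorder (t : List Char) (b : Nat) : Prop := b < t.length ∧ t.take b = t.drop (t.length - b)

-- the longest proper border of t
def maxBorder (t : List Char) : Nat :=
  Nat.findGreatest (fun b => t.take b = t.drop (t.length - b)) (t.length - 1)


-- ---- small list helpers ----

lemma getD_take {s : List Char} {i k : Nat} (h : k < i) (d : Char) :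
    (s.take i).getD k d = s.getD k d := by
  simp [List.getD, List.getElem?_take_of_lt, h]


lemma getD_snoc_len {l : List Nat} {x : Nat} (d : Nat) :
    (l ++ [x]).getD l.length d = x := by
  simp [List.getD]

lemma getD_append_left_nat {l l' : List Nat} {n : Nat} (h : n < l.length) (d : Nat) :
    (l ++ l').getD n d = l.getD n d := by
  simp [List.getD, List.getElem?_append_left, h]

lemma take_succ_getD {s : List Char} {i : Nat} (h : i < s.length) :
    s.take (i + 1) = s.take i ++ [s.getD i ' '] := by
  rw [List.take_add_one]; simp [List.getD, List.getElem?_eq_getElem h]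

lemma drop_append_ge {l1 l2 : List Char} {n : Nat} (h : l1.length ≤ n) :
    (l1 ++ l2).drop n = l2.drop (n - l1.length) := by
  have : n = l1.length + (n - l1.length) := by omega
  rw [this, List.drop_append]; simp

-- index of the (unique) sentinel in p ++ sep :: q when sep ∉ p
lemma idxOf_sep {p q : List Char} {sep : Char} (h : sep ∉ p) :
    (p ++ sep :: q).idxOf sep = p.length := by
  induction p with
  | nil => simp
  | cons a p ih =>
      have ha : a ≠ sep := fun hc => h (hc ▸ List.mem_cons_self)
      have hp : sep ∉ p := fun hc => h (List.mem_cons_of_mem _ hc)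
      simp [ha, ih hp]

-- ---- border theory ----


lemma maxBorder_lt {t : List Char} (h : t ≠ []) : maxBorder t < t.length := by
  have h1 : 0 < t.length := List.length_pos_of_ne_nil h
  have := Nat.findGreatest_le (P := fun b => t.take b = t.drop (t.length - b)) (t.length - 1)
  unfold maxBorder
  omega

lemma maxBorder_isBorder {t : List Char} (h : t ≠ []) : isBorder t (maxBorder t) := by
  refine ⟨maxBorder_lt h, ?_⟩
  have h0 : t.take 0 = t.drop (t.length - 0) := by simp
  exact Nat.findGreatest_spec (P := fun b => t.take b = t.drop (t.length - b)) (Nat.zero_le _) h0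

lemma le_maxBorder {t : List Char} {b : Nat} (hb : isBorder t b) : b ≤ maxBorder t := by
  obtain ⟨hlt, heq⟩ := hb
  exact Nat.le_findGreatest (by omega) heq

lemma border_trans {t : List Char} {b j : Nat} (hb : isBorder t b) (hj : isBorder (t.take b) j) :
    isBorder t j := by
  obtain ⟨hblt, hbeq⟩ := hb
  obtain ⟨hjlt, hjeq⟩ := hj
  have hlen : (t.take b).length = b := by simp; omega
  rw [hlen] at hjlt hjeq
  refine ⟨by omega, ?_⟩
  have h1 : (t.take b).take j = t.take j := by rw [List.take_take]; congr 1; omega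
  have h2 : (t.take b).drop (b - j) = t.drop (t.length - j) := by
    rw [hbeq, List.drop_drop]; congr 1; omega
  rw [h1, h2] at hjeq
  exact hjeq

lemma border_nest {t : List Char} {b j : Nat} (hb : isBorder t b) (hj : isBorder t j)
    (hlt : j < b) : isBorder (t.take b) j := by
  obtain ⟨hblt, hbeq⟩ := hb
  obtain ⟨hjlt, hjeq⟩ := hj
  have hlen : (t.take b).length = b := by simp; omega
  refine ⟨by omega, ?_⟩
  rw [hlen]
  have h1 : (t.take b).take j = t.take j := by rw [List.take_take]; congr 1; omega
  have h2 : (t.take b).drop (b - j) = t.drop (t.length - j) := by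
    rw [hbeq, List.drop_drop]; congr 1; omega
  rw [h1, h2]
  exact hjeq

lemma border_snoc {u : List Char} {c : Char} {b : Nat} :
    isBorder (u ++ [c]) (b + 1) ↔ isBorder u b ∧ u.getD b ' ' = c := by
  by_cases hb : b < u.length
  · have hlen : (u ++ [c]).length = u.length + 1 := by simp
    have htake : (u ++ [c]).take (b + 1) = u.take b ++ [u.getD b ' '] := by
      rw [List.take_append_of_le_length (by omega), take_succ_getD hb]
    have hdrop : (u ++ [c]).drop (u.length + 1 - (b + 1)) = u.drop (u.length - b) ++ [c] := by
      rw [List.drop_append_of_le_length (by omega)]; congr 2; omega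
    constructor
    · rintro ⟨-, heq⟩
      rw [hlen] at heq
      rw [htake, hdrop] at heq
      have hl1 : (u.take b).length = b := by simp; omega
      have hl2 : (u.drop (u.length - b)).length = b := by simp; omega
      obtain ⟨h1, h2⟩ := List.append_inj heq (by rw [hl1, hl2])
      refine ⟨⟨hb, h1⟩, by simpa using h2⟩
    · rintro ⟨⟨-, heq⟩, hc⟩
      refine ⟨by simp; omega, ?_⟩
      rw [hlen, htake, hdrop, heq, hc]
  · constructor
    · rintro ⟨hlt, -⟩
      simp at hlt
      omega
    · rintro ⟨⟨hlt, -⟩, -⟩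
      omega

lemma maxBorder_short {t : List Char} (h : t.length ≤ 1) : maxBorder t = 0 := by
  have := Nat.findGreatest_le (P := fun b => t.take b = t.drop (t.length - b)) (t.length - 1)
  unfold maxBorder
  omega


lemma findGreatest_congr {P Q : Nat → Prop} [DecidablePred P] [DecidablePred Q]
    (h : ∀ k, P k ↔ Q k) : ∀ n, Nat.findGreatest P n = Nat.findGreatest Q n := by
  intro n
  induction n with
  | zero => rfl
  | succ n ih => rw [Nat.findGreatest_succ, Nat.findGreatest_succ, ih]; by_cases hq : Q (n+1)
                 · rw [if_pos ((h _).mpr hq), if_pos hq]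
                 · rw [if_neg (fun hp => hq ((h _).mp hp)), if_neg hq]

-- the borders of s = l2 ++ sep :: l1 (sep in neither list) are exactly the overlaps
lemma s_border_iff {l1 l2 : List Char} {sep : Char} (h1 : sep ∉ l1) (h2 : sep ∉ l2) (b : Nat) :
    isBorder (l2 ++ sep :: l1) b ↔ b ≤ min l1.length l2.length ∧ l2.take b <:+ l1 := by
  have hn : (l2 ++ sep :: l1).length = l2.length + l1.length + 1 := by simp; omega
  have hdrop_hi : ∀ {m : Nat}, l1.length < m →
      (l2 ++ sep :: l1).drop ((l2 ++ sep :: l1).length - m) = l2.drop ((l2 ++ sep :: l1).length - m) ++ sep :: l1 := by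
    intro m hm
    have hle : (l2 ++ sep :: l1).length - m ≤ l2.length := by omega
    rw [List.drop_append_of_le_length hle]
  have hdrop_lo : ∀ {m : Nat}, m ≤ l1.length →
      (l2 ++ sep :: l1).drop ((l2 ++ sep :: l1).length - m) = l1.drop (l1.length - m) := by
    intro m hm
    rw [drop_append_ge (by omega)]
    have heq1 : (l2 ++ sep :: l1).length - m - l2.length = 1 + (l1.length - m) := by omega
    rw [heq1, ← List.drop_drop]
    simp
  have htake_lo : ∀ {m : Nat}, m ≤ l2.length → (l2 ++ sep :: l1).take m = l2.take m := by
    intro m hm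
    rw [List.take_append_of_le_length hm]
  have htake_hi : ∀ {m : Nat}, l2.length < m →
      (l2 ++ sep :: l1).take m = l2 ++ sep :: l1.take (m - l2.length - 1) := by
    intro m hm
    rw [List.take_append, List.take_of_length_le (by omega)]
    congr 1
    have heq1 : m - l2.length = (m - l2.length - 1) + 1 := by omega
    rw [heq1]
    simp
  constructor
  · rintro ⟨hlt, heq⟩
    rw [hn] at hlt
    -- b ≤ l2.length
    have hb2 : b ≤ l2.length := by
      by_contra hgt
      push_neg at hgt
      have ht := htake_hi hgt
      by_cases hb1 : b ≤ l1.length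
      · have hd := hdrop_lo hb1
        rw [ht, hd] at heq
        have : sep ∈ l1.drop (l1.length - b) := by
          rw [← heq]; simp
        exact h1 (List.mem_of_mem_drop this)
      · push_neg at hb1
        have hd := hdrop_hi hb1
        rw [ht, hd] at heq
        have hsep2 : sep ∉ l2.drop ((l2 ++ sep :: l1).length - b) := fun hc => h2 (List.mem_of_mem_drop hc)
        have hidx1 : (l2 ++ sep :: l1.take (b - l2.length - 1)).idxOf sep = l2.length := idxOf_sep h2
        have hidx2 : (l2.drop ((l2 ++ sep :: l1).length - b) ++ sep :: l1).idxOf sep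
            = l2.length - ((l2 ++ sep :: l1).length - b) := by
          rw [idxOf_sep hsep2, List.length_drop]
        rw [heq, hidx2] at hidx1
        omega
    -- b ≤ l1.length
    have hb1 : b ≤ l1.length := by
      by_contra hgt
      push_neg at hgt
      have ht := htake_lo hb2
      have hd := hdrop_hi (by omega : l1.length < b)
      rw [ht, hd] at heq
      have : sep ∈ l2.take b := by rw [heq]; simp
      exact h2 (List.mem_of_mem_take this)
    refine ⟨by omega, ?_⟩
    rw [htake_lo hb2, hdrop_lo hb1] at heq
    rw [List.suffix_iff_eq_drop]
    have hlen : (l2.take b).length = b := by simp; omega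
    rw [hlen, heq]
  · rintro ⟨hble, hsuf⟩
    have hb1 : b ≤ l1.length := by omega
    have hb2 : b ≤ l2.length := by omega
    refine ⟨by omega, ?_⟩
    rw [htake_lo hb2, hdrop_lo hb1]
    rw [List.suffix_iff_eq_drop] at hsuf
    have hlen : (l2.take b).length = b := by simp; omega
    rw [hlen] at hsuf
    exact hsuf

lemma s_ne_nil {l1 l2 : List Char} {sep : Char} : l2 ++ sep :: l1 ≠ [] := by simp

lemma maxBorder_s_eq {l1 l2 : List Char} {sep : Char} (h1 : sep ∉ l1) (h2 : sep ∉ l2) :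
    maxBorder (l2 ++ sep :: l1)
      = Nat.findGreatest (fun b => l2.take b <:+ l1) (min l1.length l2.length) := by
  apply Nat.le_antisymm
  · have hb := maxBorder_isBorder (t := l2 ++ sep :: l1) s_ne_nil
    rw [s_border_iff h1 h2] at hb
    exact Nat.le_findGreatest hb.1 hb.2
  · set g := Nat.findGreatest (fun b => l2.take b <:+ l1) (min l1.length l2.length) with hg
    have hP : l2.take g <:+ l1 := by
      have h0 : l2.take 0 <:+ l1 := by simp
      exact Nat.findGreatest_spec (P := fun b => l2.take b <:+ l1) (Nat.zero_le _) h0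
    have hgle : g ≤ min l1.length l2.length := Nat.findGreatest_le _
    exact le_maxBorder ((s_border_iff h1 h2 g).mpr ⟨hgle, hP⟩)

-- when the longest overlap is the full min-length one, the failure link gives the
-- longest strictly shorter overlap
lemma maxBorder_take_eq {l1 l2 : List Char} {sep : Char} (h1 : sep ∉ l1) (h2 : sep ∉ l2)
    {m : Nat} (hm : 0 < m) (hmin : m = min l1.length l2.length)
    (hbm : isBorder (l2 ++ sep :: l1) m) :
    maxBorder ((l2 ++ sep :: l1).take m)
      = Nat.findGreatest (fun b => l2.take b <:+ l1) (m - 1) := by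
  set s := l2 ++ sep :: l1 with hs
  have hmn : m < s.length := hbm.1
  have htm : (s.take m).length = m := by simp; omega
  have htne : s.take m ≠ [] := by
    intro hc
    rw [hc] at htm
    simp at htm
    omega
  apply Nat.le_antisymm
  · have hb := maxBorder_isBorder htne
    have hlt : maxBorder (s.take m) < m := by have := maxBorder_lt htne; rw [htm] at this; exact this
    have hbs := border_trans hbm hb
    rw [s_border_iff h1 h2] at hbs
    exact Nat.le_findGreatest (by omega) hbs.2
  · set g := Nat.findGreatest (fun b => l2.take b <:+ l1) (m - 1) with hg
    have hP : l2.take g <:+ l1 := by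
      have h0 : l2.take 0 <:+ l1 := by simp
      exact Nat.findGreatest_spec (P := fun b => l2.take b <:+ l1) (Nat.zero_le _) h0
    have hgle : g ≤ m - 1 := Nat.findGreatest_le _
    have hgb : isBorder s g := (s_border_iff h1 h2 g).mpr ⟨by omega, hP⟩
    exact le_maxBorder (border_nest hbm hgb (by omega))


-- exiting the while loop: k is the longest extendable border, so the step result
-- is the longest border of u ++ [c]
lemma exit_spec (s u : List Char) (c : Char) (k : Nat)
    (hgd : ∀ j, j < u.length → u.getD j ' ' = s.getD j ' ')
    (hbk : isBorder u k)
    (hdom : ∀ j, isBorder u j → u.getD j ' ' = c → j ≤ k)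
    (hexit : k = 0 ∨ c = s.getD k ' ') :
    (if c = s.getD k ' ' then k + 1 else k) = maxBorder (u ++ [c]) := by
  have hklt : k < u.length := hbk.1
  have hgk : u.getD k ' ' = s.getD k ' ' := hgd k hklt
  by_cases hc : c = s.getD k ' '
  · rw [if_pos hc]
    have hcu : u.getD k ' ' = c := by rw [hgk]; exact hc.symm
    have hb1 : isBorder (u ++ [c]) (k + 1) := border_snoc.mpr ⟨hbk, hcu⟩
    refine Nat.le_antisymm (le_maxBorder hb1) ?_
    have hmb := maxBorder_isBorder (t := u ++ [c]) (by simp)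
    rcases hEq : maxBorder (u ++ [c]) with _ | j
    · omega
    · rw [hEq] at hmb
      obtain ⟨hbj, hcj⟩ := border_snoc.mp hmb
      have := hdom j hbj hcj
      omega
  · rw [if_neg hc]
    have hk0 : k = 0 := hexit.resolve_right hc
    subst hk0
    symm
    have hmb := maxBorder_isBorder (t := u ++ [c]) (by simp)
    rcases hEq : maxBorder (u ++ [c]) with _ | j
    · rfl
    · rw [hEq] at hmb
      obtain ⟨hbj, hcj⟩ := border_snoc.mp hmb
      have hj0 : j ≤ 0 := hdom j hbj hcj
      have hj : j = 0 := by omega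
      subst hj
      rw [hgd 0 (by omega)] at hcj
      exact absurd hcj.symm hc

-- the failure-link descent computes the longest border of (s.take i) ++ [c]
lemma descend_spec (s : List Char) (pi : List Nat) (c : Char) (i : Nat)
    (hil : i < s.length)
    (hpi : ∀ j, 0 < j → j ≤ i → pi.getD (j - 1) 0 = maxBorder (s.take j)) :
    ∀ fuel k, k ≤ fuel → isBorder (s.take i) k →
      (∀ j, isBorder (s.take i) j → (s.take i).getD j ' ' = c → j ≤ k) →
      (if c = s.getD (kmpDescend s pi c fuel k) ' '
       then kmpDescend s pi c fuel k + 1 else kmpDescend s pi c fuel k)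
        = maxBorder (s.take i ++ [c]) := by
  have hulen : (s.take i).length = i := by simp; omega
  have hgd : ∀ j, j < (s.take i).length → (s.take i).getD j ' ' = s.getD j ' ' := by
    intro j hj
    rw [hulen] at hj
    exact getD_take hj ' '
  intro fuel
  induction fuel with
  | zero =>
      intro k hk hbk hdom
      have hk0 : k = 0 := by omega
      subst hk0
      simp only [kmpDescend]
      exact exit_spec s (s.take i) c 0 hgd hbk hdom (Or.inl rfl)
  | succ fuel ih =>
      intro k hk hbk hdom
      by_cases hcond : 0 < k ∧ c ≠ s.getD k ' '
      · obtain ⟨hk0, hne⟩ := hcond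
        have hstep : kmpDescend s pi c (fuel + 1) k = kmpDescend s pi c fuel (pi.getD (k - 1) 0) := by
          simp only [kmpDescend]
          rw [if_pos ⟨hk0, hne⟩]
        rw [hstep]
        have hklt : k < i := by have := hbk.1; rw [hulen] at this; exact this
        have hk2 : pi.getD (k - 1) 0 = maxBorder (s.take k) := hpi k hk0 (by omega)
        have hsk : (s.take i).take k = s.take k := by rw [List.take_take]; congr 1; omega
        have hlenk : (s.take k).length = k := by simp; omega
        have htkne : s.take k ≠ [] := by
          intro hnil
          rw [hnil] at hlenk
          simp at hlenk
          omega
        have hk2lt : pi.getD (k - 1) 0 < k := by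
          have := maxBorder_lt htkne
          rw [hlenk] at this
          omega
        have hmbk2 : isBorder (s.take i) (pi.getD (k - 1) 0) := by
          have hbb : isBorder (s.take k) (maxBorder (s.take k)) := maxBorder_isBorder htkne
          rw [← hk2] at hbb
          rw [← hsk] at hbb
          exact border_trans hbk hbb
        apply ih (pi.getD (k - 1) 0) (by omega) hmbk2
        intro j hbj hcj
        have hjk := hdom j hbj hcj
        have hjne : j ≠ k := by
          intro hjeq
          subst hjeq
          rw [hgd j hbj.1] at hcj
          exact hne hcj.symm
        have hnest := border_nest hbk hbj (by omega)
        rw [hsk] at hnest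
        have := le_maxBorder hnest
        omega
      · have hstep : kmpDescend s pi c (fuel + 1) k = k := by
          simp only [kmpDescend]
          rw [if_neg hcond]
        rw [hstep]
        have hexit : k = 0 ∨ c = s.getD k ' ' := by
          by_cases hz : k = 0
          · exact Or.inl hz
          · refine Or.inr ?_
            by_contra hcc
            exact hcond ⟨by omega, hcc⟩
        exact exit_spec s (s.take i) c k hgd hbk hdom hexit

-- loop invariant for Source B's for-loop: after N iterations the table holds the
-- longest borders of all prefixes processed so far
lemma kmp_invariant (s : List Char) (hs : 0 < s.length) :
    ∀ N, N ≤ s.length - 1 →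
      ((List.range N).foldl (fun st j => kmpStep s st (j + 1)) ([0], 0)).1.length = N + 1 ∧
      (∀ j, 0 < j → j ≤ N + 1 →
        ((List.range N).foldl (fun st j => kmpStep s st (j + 1)) ([0], 0)).1.getD (j - 1) 0
          = maxBorder (s.take j)) ∧
      ((List.range N).foldl (fun st j => kmpStep s st (j + 1)) ([0], 0)).2
        = maxBorder (s.take (N + 1)) := by
  intro N
  induction N with
  | zero =>
      intro _
      refine ⟨by simp, ?_, ?_⟩
      · intro j hj1 hj2
        have hj : j = 1 := by omega
        subst hj
        simp [List.getD]
        symm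
        exact maxBorder_short (by simp)
      · simp
        symm
        exact maxBorder_short (by simp)
  | succ N ih =>
      intro hN
      obtain ⟨ih1, ih2, ih3⟩ := ih (by omega)
      rw [List.range_succ, List.foldl_append]
      set st := (List.range N).foldl (fun st j => kmpStep s st (j + 1)) ([0], 0) with hst
      have hil : N + 1 < s.length := by omega
      have hulen : (s.take (N + 1)).length = N + 1 := by simp; omega
      have hune : s.take (N + 1) ≠ [] := by
        intro hnil
        rw [hnil] at hulen
        simp at hulen
      have hds := descend_spec s st.1 (s.getD (N + 1) ' ') (N + 1) hil ih2 st.2 st.2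
        (le_refl _)
        (by rw [ih3]; exact maxBorder_isBorder hune)
        (by intro j hbj _; rw [ih3]; exact le_maxBorder hbj)
      have hsucc : s.take (N + 1) ++ [s.getD (N + 1) ' '] = s.take (N + 2) :=
        (take_succ_getD hil).symm
      rw [hsucc] at hds
      simp only [List.foldl_cons, List.foldl_nil, kmpStep]
      refine ⟨by simp [ih1], ?_, ?_⟩
      · intro j hj1 hj2
        by_cases hje : j ≤ N + 1
        · have hlt : j - 1 < st.1.length := by omega
          rw [getD_append_left_nat hlt]
          exact ih2 j hj1 hje
        · have hj : j = N + 2 := by omega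
          subst hj
          have : N + 2 - 1 = st.1.length := by omega
          rw [this, getD_snoc_len]
          exact hds
      · exact hds

lemma kmpPrefix_spec (s : List Char) (hs : 0 < s.length) :
    (kmpPrefix s).2 = maxBorder s ∧
    ∀ j, 0 < j → j ≤ s.length → (kmpPrefix s).1.getD (j - 1) 0 = maxBorder (s.take j) := by
  obtain ⟨h1, h2, h3⟩ := kmp_invariant s hs (s.length - 1) (le_refl _)
  have hlen : s.length - 1 + 1 = s.length := by omega
  unfold kmpPrefix
  constructor
  · rw [h3, hlen, List.take_length]
  · intro j hj1 hj2
    exact h2 j hj1 (by omega)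


-- A's ascending scan keeping the last hit computes the greatest hit
lemma foldA_eq (f : Int → Bool) : ∀ (N : Nat),
    (PySem.List.pyRange 1 (N : Int) 1).foldl (fun acc x => if f x then x else acc) 0
      = ((Nat.findGreatest (fun k => f (k : Int) = true) (N - 1) : Nat) : Int) := by
  intro N
  induction N with
  | zero =>
      rw [PySem.List.pyRange_one_eq_nil (by norm_num)]
      simp
  | succ n ih =>
      cases n with
      | zero =>
          rw [PySem.List.pyRange_one_eq_nil (by norm_num)]
          simp
      | succ m =>
          have hcast : ((m + 2 : Nat) : Int) = ((m + 1 : Nat) : Int) + 1 := by push_cast; ring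
          rw [hcast, PySem.List.pyRange_one_succ_right (by push_cast; omega), List.foldl_append]
          simp only [List.foldl_cons, List.foldl_nil]
          rw [ih]
          have harith1 : (m + 2 : Nat) - 1 = (m + 1 : Nat) := by omega
          have harith2 : (m + 1 : Nat) - 1 = (m : Nat) := by omega
          rw [harith1, harith2, Nat.findGreatest_succ]
          by_cases hf : f ((m + 1 : Nat) : Int) = true
          · rw [hf]
            simp
          · have : f ((m + 1 : Nat) : Int) = false := by
              cases h : f ((m + 1 : Nat) : Int)
              · rfl
              · exact absurd h hf
            rw [this]
            simp

-- the sentinel is outside the printable-ASCII domain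
lemma dom_sep_not_mem {w : String} (h : pvDomStr w = true) : Char.ofNat 0 ∉ w.toList := by
  intro hmem
  unfold pvDomStr at h
  have hc := List.all_eq_true.mp h _ hmem
  revert hc
  decide


-- B's final overlap (failure value, with one failure-link step if the overlap is
-- full-length) is exactly A's greatest overlap below min-length
lemma commons_eq (l1 l2 : List Char) (h1 : Char.ofNat 0 ∉ l1) (h2 : Char.ofNat 0 ∉ l2) :
    (if 0 < min l1.length l2.length ∧
        (kmpPrefix (l2 ++ Char.ofNat 0 :: l1)).2 = min l1.length l2.length
     then (kmpPrefix (l2 ++ Char.ofNat 0 :: l1)).1.getD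
            ((kmpPrefix (l2 ++ Char.ofNat 0 :: l1)).2 - 1) 0
     else (kmpPrefix (l2 ++ Char.ofNat 0 :: l1)).2)
      = Nat.findGreatest (fun b => l2.take b <:+ l1) (min l1.length l2.length - 1) := by
  have hslen : 0 < (l2 ++ Char.ofNat 0 :: l1).length := by simp
  obtain ⟨hk2, hkpi⟩ := kmpPrefix_spec (l2 ++ Char.ofNat 0 :: l1) hslen
  have hmbs : (kmpPrefix (l2 ++ Char.ofNat 0 :: l1)).2
      = Nat.findGreatest (fun b => l2.take b <:+ l1) (min l1.length l2.length) := by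
    rw [hk2]
    exact maxBorder_s_eq h1 h2
  by_cases hc : 0 < min l1.length l2.length ∧
      (kmpPrefix (l2 ++ Char.ofNat 0 :: l1)).2 = min l1.length l2.length
  · rw [if_pos hc]
    obtain ⟨hm0, hceq⟩ := hc
    have hbm : isBorder (l2 ++ Char.ofNat 0 :: l1) (min l1.length l2.length) := by
      rw [← hceq, hk2]
      exact maxBorder_isBorder s_ne_nil
    have hmlt : min l1.length l2.length < (l2 ++ Char.ofNat 0 :: l1).length := by simp
    rw [hceq, hkpi _ hm0 (by omega)]
    exact maxBorder_take_eq h1 h2 hm0 rfl hbm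
  · rw [if_neg hc, hmbs]
    by_cases hm0 : min l1.length l2.length = 0
    · rw [hm0]
    · have hne : Nat.findGreatest (fun b => l2.take b <:+ l1) (min l1.length l2.length)
          ≠ min l1.length l2.length := by
        intro heq
        exact hc ⟨by omega, by rw [hmbs, heq]⟩
      obtain ⟨mm, hmm⟩ : ∃ mm, min l1.length l2.length = mm + 1 :=
        ⟨min l1.length l2.length - 1, by omega⟩
      rw [hmm] at hne ⊢
      simp only [Nat.add_sub_cancel]
      rw [Nat.findGreatest_succ] at hne
      split_ifs at hne with hsp
      · exact absurd rfl hne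
      · rw [Nat.findGreatest_succ, if_neg hsp]

-- A's per-step test is the overlap predicate
lemma endswith_take_iff (w1 w2 : String) : ∀ (k : Nat),
    ((fun x => PySem.Str.endswith w1 (PySem.Str.slice w2 none (some x))) (k : Int) = true)
      ↔ (fun b => w2.toList.take b <:+ w1.toList) k := by
  intro k
  have hsl : (PySem.Str.slice w2 none (some (k : Int))).toList = w2.toList.take k := by
    simp [PySem.Str.toList_slice, PySem.List.slice_to]
  simp only [PySem.Str.endswith_eq, hsl]
  exact PySem.Chars.endswith_iff _ _

-- ===== VERDICT (by name: the statement is the Claim_ definition above) =====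
set_option maxHeartbeats 2000000 in
theorem condense_words_spec : Claim_equal_condense_words := by
  intro w1 w2 hdom
  unfold Dom_condense_words at hdom
  rw [Bool.and_eq_true] at hdom
  have h1 : Char.ofNat 0 ∉ w1.toList := dom_sep_not_mem hdom.1
  have h2 : Char.ofNat 0 ∉ w2.toList := dom_sep_not_mem hdom.2
  show condense_words w1 w2 = condense_words_alt w1 w2
  unfold condense_words condense_words_alt
  simp only [PySem.Str.len_eq]
  rw [show min ((w1.toList.length : Int)) ((w2.toList.length : Int))
        = ((min w1.toList.length w2.toList.length : Nat) : Int) from by push_cast; ring]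
  rw [foldA_eq (fun x => PySem.Str.endswith w1 (PySem.Str.slice w2 none (some x)))
        (min w1.toList.length w2.toList.length)]
  rw [findGreatest_congr (endswith_take_iff w1 w2) (min w1.toList.length w2.toList.length - 1)]
  rw [commons_eq w1.toList w2.toList h1 h2]
  split_ifs with hA hB hB
  · congr 1
    simp [PySem.Str.toList_slice, PySem.List.slice_from]
  · exfalso
    apply hB
    push_cast at hA
    omega
  · exfalso
    apply hA
    push_cast
    omega
  · rfl
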